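-- pv_equiv track=rewrite | github.com/LiuKang1080/Code_Wars | Python/Spongebob_Meme.py | spongebob_meme
-- ===== SOURCE A (Python) =====
-- def spongebob_meme(sentence):
--     """
--     Converts the given string into sponge case. Sponge case is alternating uppercase letter followed by a lowercase letter.
--     ex) Hello World --> HeLlO wOrLd
--
--     Parameters
--     ----------
--     sentence : The sentence that will be converted to sponge case.
--
--     Return
--     ----------
--     sponge_case : Explicitly returns the sentence converted into sponge case.
--     """
--
--     # declare variables
--     sponge_case = ""
--     counter = True
--
--     for i in sentence:
--         if not i.isalpha():
--             sponge_case += i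
--             continue
--
--         if counter:
--             sponge_case += i.upper()
--         else:
--             sponge_case += i.lower()
--
--         counter = not counter
--
--     return sponge_case
-- ===== SOURCE B (Python) =====
-- def spongebob_meme(sentence):
--     alt = iter(c.upper() if i % 2 == 0 else c.lower()
--                for i, c in enumerate(filter(str.isalpha, sentence)))
--     return ''.join(next(alt) if c.isalpha() else c for c in sentence)
-- ===== Notes on version B (the rewrite author's own statement) =====
-- stated objective: idiomatic
-- what changed: Replaces the fused loop with mutable string/flag state by two passes: first compute the alternating-case letters by letter index over the filtered alphabetic characters, then join them back among the non-alphabetic characters.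
import Mathlib
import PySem

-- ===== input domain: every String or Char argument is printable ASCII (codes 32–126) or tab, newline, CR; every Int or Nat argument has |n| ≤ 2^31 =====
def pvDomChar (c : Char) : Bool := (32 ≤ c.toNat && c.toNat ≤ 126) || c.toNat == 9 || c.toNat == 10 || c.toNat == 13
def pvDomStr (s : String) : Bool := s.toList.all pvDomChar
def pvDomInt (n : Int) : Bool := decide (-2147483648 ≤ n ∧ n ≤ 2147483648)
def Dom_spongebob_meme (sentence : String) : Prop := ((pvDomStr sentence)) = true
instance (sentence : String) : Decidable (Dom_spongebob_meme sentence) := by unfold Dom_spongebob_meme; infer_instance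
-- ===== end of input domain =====

-- B recomputes the same sponge case in two passes (alternating letters first, then reassembly) instead of A's fused loop; objective: idiomatic.

-- ===== PORT A =====
-- the for-loop of A, carrying the accumulated string (as List Char) and the counter flag
def spongeGo : List Char → List Char → Bool → List Char
  | [], acc, _ => acc
  | c :: cs, acc, counter =>
    if ¬ PySem.Chars.isalpha c then spongeGo cs (acc ++ [c]) counter
    else if counter then spongeGo cs (acc ++ [PySem.Chars.upperChar c]) (!counter)
    else spongeGo cs (acc ++ [PySem.Chars.lowerChar c]) (!counter)

def spongebob_meme (sentence : String) : String :=
  String.mk (spongeGo sentence.toList [] true)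

-- ===== PORT B =====
-- the generator: enumerate(filter(str.isalpha, sentence)) with i % 2 deciding the case
def altLetters : Nat → List Char → List Char
  | _, [] => []
  | i, c :: cs =>
    (if i % 2 == 0 then PySem.Chars.upperChar c else PySem.Chars.lowerChar c) :: altLetters (i + 1) cs

-- the join pass: take the next alternating letter for each alphabetic char, keep others
def reassemble : List Char → List Char → List Char
  | [], _ => []
  | c :: cs, alts =>
    if PySem.Chars.isalpha c then
      match alts with
      | a :: rest => a :: reassemble cs rest
      | [] => []            -- next() on an exhausted iterator; unreachable (letter counts match)
    else c :: reassemble cs alts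

def spongebob_meme_alt (sentence : String) : String :=
  String.mk (reassemble sentence.toList (altLetters 0 (sentence.toList.filter PySem.Chars.isalpha)))

-- ===== PRECONDITION & SPEC =====
def Spec_spongebob_meme (sentence : String) (out : String) : Prop := out = spongebob_meme_alt sentence
instance (sentence : String) (out : String) : Decidable (Spec_spongebob_meme sentence out) := by unfold Spec_spongebob_meme; infer_instance

-- ===== CLAIM (what is proved, stated in full; the proofs are below) =====
def Claim_equal_spongebob_meme : Prop := ∀ (sentence : String), Dom_spongebob_meme sentence → Spec_spongebob_meme sentence (spongebob_meme sentence)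

-- ===== LEMMAS AND PROOFS =====

-- altLetters only depends on the parity of its index, expressed as a Bool toggle
def tog : Bool → List Char → List Char
  | _, [] => []
  | b, c :: cs => (if b then PySem.Chars.upperChar c else PySem.Chars.lowerChar c) :: tog (!b) cs

lemma altLetters_eq_tog (cs : List Char) : ∀ i, altLetters i cs = tog (i % 2 == 0) cs := by
  induction cs with
  | nil => intro i; rfl
  | cons c cs ih =>
    intro i
    have h2 : i % 2 = 0 ∨ i % 2 = 1 := Nat.mod_two_eq_zero_or_one i
    have hflip : ((i + 1) % 2 == 0) = !(i % 2 == 0) := by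
      rcases h2 with h | h <;> simp [Nat.add_mod, h]
    simp [altLetters, tog, ih, hflip]

lemma spongeGo_eq (cs : List Char) :
    ∀ acc b, spongeGo cs acc b = acc ++ reassemble cs (tog b (cs.filter PySem.Chars.isalpha)) := by
  induction cs with
  | nil => intro acc b; simp [spongeGo, reassemble]
  | cons c cs ih =>
    intro acc b
    by_cases h : PySem.Chars.isalpha c = true
    · cases b <;>
        simp [spongeGo, reassemble, h, List.filter_cons, tog, ih, List.append_assoc]
    · simp [spongeGo, reassemble, h, List.filter_cons, ih, List.append_assoc]

-- ===== VERDICT (by name: the statement is the Claim_ definition above) =====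
theorem spongebob_meme_spec : Claim_equal_spongebob_meme := by
  intro s _
  unfold Spec_spongebob_meme spongebob_meme spongebob_meme_alt
  rw [spongeGo_eq, altLetters_eq_tog]
  simp
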